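-- pv_equiv track=rewrite | github.com/sgongar/Euclid-SSOs-Pipeline | pipeline/misc.py | get_dither
-- ===== SOURCE A (Python) =====
-- def get_dither(catalog_n):
--     """
--
--     :param catalog_n:
--     :return: dither_n
--     """
--     cats = [['x0_y0', 1, 1], ['x0_y0', 2, 2], ['x0_y0', 3, 3],
--             ['x0_y0', 4, 4], ['x0_y1', 1, 5], ['x0_y1', 2, 6],
--             ['x0_y1', 3, 7], ['x0_y1', 4, 8], ['x0_y2', 1, 9],
--             ['x0_y2', 2, 10], ['x0_y2', 3, 11], ['x0_y2', 4, 12],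
--             ['x1_y0', 1, 13], ['x1_y0', 2, 14], ['x1_y0', 3, 15],
--             ['x1_y0', 4, 16], ['x1_y1', 1, 17], ['x1_y1', 2, 18],
--             ['x1_y1', 3, 19], ['x1_y1', 4, 20], ['x1_y2', 1, 21],
--             ['x1_y2', 2, 22], ['x1_y2', 3, 23], ['x1_y2', 4, 24],
--             ['x2_y0', 1, 25], ['x2_y0', 2, 26], ['x2_y0', 3, 27],
--             ['x2_y0', 4, 28], ['x2_y1', 1, 29], ['x2_y1', 2, 30],
--             ['x2_y1', 3, 31], ['x2_y1', 4, 32], ['x2_y2', 1, 33],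
--             ['x2_y2', 2, 34], ['x2_y2', 3, 35], ['x2_y2', 4, 36]]
--
--     ccd = ''
--     dither = 0
--     for cat_ in cats:
--         if cat_[2] == catalog_n:
--             ccd = cat_[0]
--             dither = cat_[1]
--
--     return ccd, int(dither)
-- ===== SOURCE B (Python) =====
-- def get_dither(catalog_n):
--     k = catalog_n - 1
--     if 0 <= k < 36:
--         return "x{}_y{}".format(k // 12, (k // 4) % 3), k % 4 + 1
--     return '', 0
-- ===== Notes on version B (the rewrite author's own statement) =====
-- stated objective: simpler
-- what changed: Replaces the full lookup-table scan with a closed-form arithmetic computation of the ccd name and dither from the catalog number after a single range check.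
import Mathlib
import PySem

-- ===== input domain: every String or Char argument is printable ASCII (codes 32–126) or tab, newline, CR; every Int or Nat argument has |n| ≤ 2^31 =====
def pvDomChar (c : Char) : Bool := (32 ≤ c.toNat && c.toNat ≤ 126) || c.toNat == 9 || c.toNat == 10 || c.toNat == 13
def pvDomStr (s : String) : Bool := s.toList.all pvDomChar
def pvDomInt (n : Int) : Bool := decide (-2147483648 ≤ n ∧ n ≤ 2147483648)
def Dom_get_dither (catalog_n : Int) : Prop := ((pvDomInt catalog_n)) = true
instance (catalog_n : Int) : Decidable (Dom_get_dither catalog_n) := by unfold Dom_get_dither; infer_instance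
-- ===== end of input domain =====

-- ===== PORT A =====
-- header: B replaces the table scan with closed-form arithmetic (simpler); return values only, no side effects.
def get_dither_cats : List (String × Int × Int) :=
  [("x0_y0", 1, 1),
    ("x0_y0", 2, 2),
    ("x0_y0", 3, 3),
    ("x0_y0", 4, 4),
    ("x0_y1", 1, 5),
    ("x0_y1", 2, 6),
    ("x0_y1", 3, 7),
    ("x0_y1", 4, 8),
    ("x0_y2", 1, 9),
    ("x0_y2", 2, 10),
    ("x0_y2", 3, 11),
    ("x0_y2", 4, 12),
    ("x1_y0", 1, 13),
    ("x1_y0", 2, 14),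
    ("x1_y0", 3, 15),
    ("x1_y0", 4, 16),
    ("x1_y1", 1, 17),
    ("x1_y1", 2, 18),
    ("x1_y1", 3, 19),
    ("x1_y1", 4, 20),
    ("x1_y2", 1, 21),
    ("x1_y2", 2, 22),
    ("x1_y2", 3, 23),
    ("x1_y2", 4, 24),
    ("x2_y0", 1, 25),
    ("x2_y0", 2, 26),
    ("x2_y0", 3, 27),
    ("x2_y0", 4, 28),
    ("x2_y1", 1, 29),
    ("x2_y1", 2, 30),
    ("x2_y1", 3, 31),
    ("x2_y1", 4, 32),
    ("x2_y2", 1, 33),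
    ("x2_y2", 2, 34),
    ("x2_y2", 3, 35),
    ("x2_y2", 4, 36)]

def get_dither (catalog_n : Int) : String × Int :=
  let r := get_dither_cats.foldl
    (fun (st : String × Int) cat_ =>
      if cat_.2.2 == catalog_n then (cat_.1, cat_.2.1) else st)
    ("", 0)
  (r.1, r.2)

-- ===== PORT B =====
def get_dither_alt (catalog_n : Int) : String × Int :=
  let k := catalog_n - 1
  if 0 ≤ k ∧ k < 36 then
    ("x" ++ PySem.Int.toStr (PySem.Int.floordiv k 12) ++ "_y" ++
       PySem.Int.toStr (PySem.Int.mod (PySem.Int.floordiv k 4) 3),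
     PySem.Int.mod k 4 + 1)
  else ("", 0)

-- ===== PRECONDITION & SPEC =====
def Spec_get_dither (catalog_n : Int) (out : String × Int) : Prop := out = get_dither_alt catalog_n
instance (catalog_n : Int) (out : String × Int) : Decidable (Spec_get_dither catalog_n out) := by unfold Spec_get_dither; infer_instance

-- ===== CLAIM (what is proved, stated in full; the proofs are below) =====
def Claim_equal_get_dither : Prop := ∀ (catalog_n : Int), Dom_get_dither catalog_n → Spec_get_dither catalog_n (get_dither catalog_n)

-- ===== LEMMAS AND PROOFS =====

-- ===== VERDICT (by name: the statement is the Claim_ definition above) =====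
theorem get_dither_spec : Claim_equal_get_dither := by
  intro n _
  unfold Spec_get_dither
  by_cases h : 1 ≤ n ∧ n ≤ 36
  · obtain ⟨h1, h2⟩ := h
    interval_cases n <;> decide
  · have hall : ∀ m : Int, 1 ≤ m → m ≤ 36 → m ≠ n := by
      intro m hm1 hm2 he; exact h ⟨he ▸ hm1, he ▸ hm2⟩
    simp only [get_dither, get_dither_alt, get_dither_cats, List.foldl, beq_iff_eq]
    repeat rw [if_neg (by omega)]
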